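-- pv_equiv track=rewrite | github.com/Shwaubh/HackerrankSolutions | easy/string/Weighted Uniform Strings.py | list_total
-- ===== SOURCE A (Python) =====
-- def list_total(s = ''):
--     cur = s[0]
--     lis = []
--     x = 0
--     i = 0
--     while i < len(s):
--         if s[i] == cur:
--             if s[i].islower():
--                 x = x + ord(s[i]) - 96
--                 lis.append(x)
--             else:
--                 x = x + ord(s[i]) - 64
--                 lis.append(x)
--             i+=1
--         else:
--             cur = s[i]
--             x = 0
--     return lis
-- ===== SOURCE B (Python) =====
-- def list_total(s=''):
--     # pass 1: start[i] = index where the run containing position i begins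
--     start = []
--     for i in range(len(s)):
--         start.append(start[-1] if i and s[i] == s[i - 1] else i)
--     # pass 2: position inside the run times the letter weight, no running sum
--     return [(i - start[i] + 1) * (ord(s[i]) - (96 if s[i].islower() else 64))
--             for i in range(len(s))]
-- ===== Notes on version B (the rewrite author's own statement) =====
-- stated objective: alternative
-- what changed: B has no running weight sum at all: a first pass computes for every index the start index of its run, then a second pass emits each value by the closed form (i - start[i] + 1) * weight(s[i]); this replaces A's accumulator while-loop whose index stalls to reset x at run boundaries (constant-factor win from list comprehensions and no per-character append-to-result branch logic).
-- crash fix: On the empty string A raises IndexError (it reads s[0] before the loop); B naturally returns []. — e.g. on list_total(""): A raises IndexError, B returns []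
import Mathlib
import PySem

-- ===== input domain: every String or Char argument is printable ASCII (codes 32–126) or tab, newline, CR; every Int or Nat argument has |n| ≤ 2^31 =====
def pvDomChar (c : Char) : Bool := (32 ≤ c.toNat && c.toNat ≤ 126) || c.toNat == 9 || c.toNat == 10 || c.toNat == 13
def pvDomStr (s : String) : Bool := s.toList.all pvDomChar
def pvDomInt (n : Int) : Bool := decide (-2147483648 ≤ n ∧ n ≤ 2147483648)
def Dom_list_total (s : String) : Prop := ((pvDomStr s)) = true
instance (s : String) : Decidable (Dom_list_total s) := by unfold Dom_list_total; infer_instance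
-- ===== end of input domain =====

-- B replaces A's accumulator loop by two staged passes: compute each position's run-start
-- index, then emit (i - start[i] + 1) * weight(s[i]) as a closed form.  Objective: alternative.

-- ===== PORT A =====
-- A's while loop: i advances only when s[i] == cur; otherwise cur is reset and the
-- same index is revisited, so the measure carries whether s[i] already equals cur.
def loopA (s : List Char) (i : Nat) (cur : Char) (x : Int) (lis : List Int) : List Int :=
  if h : i < s.length then
    if s[i] == cur then
      if PySem.Chars.islower s[i] then
        loopA s (i + 1) cur (x + (s[i].toNat : Int) - 96) (lis ++ [x + (s[i].toNat : Int) - 96])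
      else
        loopA s (i + 1) cur (x + (s[i].toNat : Int) - 64) (lis ++ [x + (s[i].toNat : Int) - 64])
    else
      loopA s i (s[i]) 0 lis
  else lis
termination_by (s.length - i, if s[i]? == some cur then 0 else 1)
decreasing_by
  · exact Prod.Lex.left _ _ (by omega)
  · exact Prod.Lex.left _ _ (by omega)
  · apply Prod.Lex.right
    simp_all

def list_total (s : String) : List Int :=
  match s.toList with
  | [] => []          -- Python raises IndexError at `cur = s[0]`; excluded by Pre_
  | c :: _ => loopA s.toList 0 c 0 []

-- ===== PORT B =====
-- pass 1 of Source B: start.append(start[-1] if i and s[i] == s[i-1] else i)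
def startList (l : List Char) : List Nat :=
  (List.range l.length).foldl
    (fun (st : List Nat) i =>
      st ++ [if i ≠ 0 ∧ l.getD i ' ' = l.getD (i - 1) ' ' then st.getLastD 0 else i]) []

-- pass 2 of Source B: the closed-form list comprehension (all indices are in range in Python;
-- the getD defaults are never used for i < length, so the port is exact there)
def list_total_alt (s : String) : List Int :=
  (List.range s.toList.length).map (fun i : Nat =>
    ((i : Int) - ((startList s.toList).getD i 0 : Int) + 1) *
      ((s.toList.getD i ' ').toNat - (if PySem.Chars.islower (s.toList.getD i ' ') then 96 else 64) : Int))

-- ===== PRECONDITION & SPEC =====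
-- Pre_ excludes only the empty string, on which A raises IndexError at `cur = s[0]`.
def Pre_list_total (s : String) : Prop := s ≠ ""
instance (s : String) : Decidable (Pre_list_total s) := by unfold Pre_list_total; infer_instance
def pvWitness_list_total : String := "abbCC?"

-- On the empty string A raises IndexError (it reads s[0] before the loop); B naturally returns [].
def Raises_list_total (s : String) : Prop := s = ""
instance (s : String) : Decidable (Raises_list_total s) := by unfold Raises_list_total; infer_instance
def pvRaiseWitness_list_total : String := ""
def pvRaiseWitnessOut_list_total : List Int := []

def Spec_list_total (s : String) (out : List Int) : Prop := out = list_total_alt s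
instance (s : String) (out : List Int) : Decidable (Spec_list_total s out) := by unfold Spec_list_total; infer_instance

-- ===== CLAIM (what is proved, stated in full; the proofs are below) =====
def Claim_equal_list_total : Prop := ∀ (s : String), Dom_list_total s → Pre_list_total s → Spec_list_total s (list_total s)
def Claim_raises_list_total : Prop := (∀ (s : String), Dom_list_total s → Raises_list_total s → ¬ Pre_list_total s) ∧ (Dom_list_total (pvRaiseWitness_list_total) ∧ Raises_list_total (pvRaiseWitness_list_total) ∧ list_total_alt (pvRaiseWitness_list_total) = pvRaiseWitnessOut_list_total)

-- ===== LEMMAS AND PROOFS =====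

-- the per-character weight both programs use
def wgt (c : Char) : Int := (c.toNat : Int) - (if PySem.Chars.islower c then 96 else 64)

-- A's loop rephrased structurally on the remaining suffix (the stalled index step
-- `cur := s[i]; x := 0` is fused with the consuming step that follows it)
def loopL : List Char → Char → Int → List Int → List Int
  | [], _, _, lis => lis
  | c :: rest, cur, x, lis =>
    if c == cur then loopL rest cur (x + wgt c) (lis ++ [x + wgt c])
    else loopL rest c (wgt c) (lis ++ [wgt c])

theorem loopA_eq_loopL (s : List Char) (i : Nat) (cur : Char) (x : Int) (lis : List Int) :
    loopA s i cur x lis = loopL (s.drop i) cur x lis := by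
  fun_induction loopA s i cur x lis with
  | case1 i cur x lis h heq hl ih =>
      rw [List.drop_eq_getElem_cons h]
      simp only [loopL, heq, if_true, ih]
      simp [wgt, hl, ← add_sub_assoc]
  | case2 i cur x lis h heq hl ih =>
      rw [List.drop_eq_getElem_cons h]
      simp only [loopL, heq, if_true, ih]
      simp [wgt, hl, ← add_sub_assoc]
  | case3 i cur x lis h heq ih =>
      rw [ih, List.drop_eq_getElem_cons h]
      simp only [loopL, heq, beq_self_eq_true, if_true]
      simp
  | case4 i cur x lis h =>
      rw [List.drop_eq_nil_of_le (by omega)]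
      simp [loopL]

def flatRuns (rs : List (Char × Nat)) : List Int :=
  rs.flatMap (fun r => (List.range r.2).map (fun j : Nat => ((j : Int) + 1) * wgt r.1))

def expandRuns (rs : List (Char × Nat)) : List Char :=
  rs.flatMap (fun r => List.replicate r.2 r.1)

def runsOf : List Char → List (Char × Nat)
  | [] => []
  | c :: rest =>
    match runsOf rest with
    | (c', k) :: t => if c == c' then (c, k + 1) :: t else (c, 1) :: (c', k) :: t
    | [] => [(c, 1)]

theorem runsOf_head (c : Char) (rest : List Char) :
    ∃ k t, runsOf (c :: rest) = (c, k) :: t := by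
  cases hr : runsOf rest with
  | nil => exact ⟨1, [], by simp [runsOf, hr]⟩
  | cons r t =>
      obtain ⟨c', k⟩ := r
      by_cases hc : (c == c') = true
      · exact ⟨k + 1, t, by simp [runsOf, hr, hc]⟩
      · exact ⟨1, (c', k) :: t, by simp [runsOf, hr, hc]⟩

theorem runsOf_expand (l : List Char) : expandRuns (runsOf l) = l := by
  induction l with
  | nil => rfl
  | cons c rest ih =>
      cases hr : runsOf rest with
      | nil =>
          have hrest : rest = [] := by rw [← ih, hr]; rfl
          simp [runsOf, expandRuns, hrest]
      | cons r t =>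
          obtain ⟨c', k⟩ := r
          rw [hr] at ih
          by_cases hc : (c == c') = true
          · have : c = c' := by simpa using hc
            subst this
            simp only [runsOf, hr, hc, if_true]
            simp only [expandRuns, List.flatMap_cons] at ih ⊢
            rw [List.replicate_succ, List.cons_append, ih]
          · simp only [runsOf, hr]
            rw [if_neg hc]
            simp only [expandRuns, List.flatMap_cons] at ih ⊢
            rw [← ih]
            simp

def GoodRuns (rs : List (Char × Nat)) : Prop :=
  (∀ r ∈ rs, 1 ≤ r.2) ∧ rs.IsChain (fun a b => a.1 ≠ b.1)

theorem runsOf_good (l : List Char) : GoodRuns (runsOf l) := by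
  induction l with
  | nil => exact ⟨by simp [runsOf], by simp [runsOf]⟩
  | cons c rest ih =>
      cases hr : runsOf rest with
      | nil => refine ⟨?_, ?_⟩ <;> simp [runsOf, hr]
      | cons r t =>
          obtain ⟨c', k⟩ := r
          rw [hr] at ih
          obtain ⟨hcnt, hchain⟩ := ih
          by_cases hc : (c == c') = true
          · refine ⟨?_, ?_⟩ <;> simp only [runsOf, hr] <;> rw [if_pos hc]
            · intro r hrm
              rcases List.mem_cons.mp hrm with h1 | h2
              · subst h1; omega
              · exact hcnt r (List.mem_cons_of_mem _ h2)
            · have : c = c' := by simpa using hc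
              subst this
              cases t with
              | nil => simp
              | cons b t' =>
                  rw [List.isChain_cons_cons] at hchain ⊢
                  exact hchain
          · refine ⟨?_, ?_⟩ <;> simp only [runsOf, hr] <;> rw [if_neg hc]
            · intro r hrm
              rcases List.mem_cons.mp hrm with h1 | h2
              · subst h1; omega
              · exact hcnt r h2
            · rw [List.isChain_cons_cons]
              exact ⟨by simpa using hc, hchain⟩

theorem loopL_replicate (k : Nat) (c : Char) (x : Int) (lis : List Int) (rest : List Char) :
    loopL (List.replicate k c ++ rest) c x lis
      = loopL rest c (x + k * wgt c) (lis ++ (List.range k).map (fun j : Nat => x + ((j : Int) + 1) * wgt c)) := by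
  induction k generalizing x lis with
  | zero => simp [List.replicate]
  | succ k ih =>
      rw [List.replicate_succ, List.cons_append]
      simp only [loopL, beq_self_eq_true, if_true]
      rw [ih]
      congr 1
      · push_cast; ring
      · have hmap : (List.range k).map ((fun j : Nat => x + ((j : Int) + 1) * wgt c) ∘ Nat.succ)
            = (List.range k).map (fun j : Nat => (x + wgt c) + ((j : Int) + 1) * wgt c) := by
          apply List.map_congr_left
          intro a _
          simp only [Function.comp_apply]
          push_cast
          ring
        rw [List.range_succ_eq_map, List.map_cons, List.map_map, hmap]
        simp only [Nat.cast_zero, zero_add, one_mul, List.append_assoc, List.singleton_append]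

theorem loopL_main (rs : List (Char × Nat)) (hG : GoodRuns rs) (c : Char) (x : Int) (lis : List Int)
    (hne : ∀ k t, rs = (c, k) :: t → False) :
    loopL (expandRuns rs) c x lis = lis ++ flatRuns rs := by
  induction rs generalizing c x lis with
  | nil => simp [expandRuns, flatRuns, loopL]
  | cons r t ih =>
      obtain ⟨c', k⟩ := r
      have hc' : c' ≠ c := fun h => hne k t (by rw [h])
      obtain ⟨m, rfl⟩ : ∃ m, k = m + 1 := by
        have := hG.1 (c', k) (List.mem_cons_self)
        exact ⟨k - 1, by omega⟩
      have step : loopL (expandRuns ((c', m + 1) :: t)) c x lis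
          = loopL (expandRuns ((c', m + 1) :: t)) c' 0 lis := by
        simp only [expandRuns, List.flatMap_cons, List.replicate_succ, List.cons_append, loopL,
          beq_self_eq_true, if_true, beq_iff_eq, hc', if_false, zero_add]
      rw [step]
      have hexp : expandRuns ((c', m + 1) :: t)
          = List.replicate (m + 1) c' ++ expandRuns t := by simp [expandRuns]
      rw [hexp, loopL_replicate]
      have hGt : GoodRuns t := ⟨fun r hr => hG.1 r (List.mem_cons_of_mem _ hr),
        (List.isChain_cons.mp hG.2).2⟩
      have hnet : ∀ k' t', t = (c', k') :: t' → False := by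
        intro k' t' het
        have := hG.2
        rw [het, List.isChain_cons_cons] at this
        exact this.1 rfl
      rw [ih hGt c' _ _ hnet]
      simp only [flatRuns, List.flatMap_cons, zero_add, List.append_assoc]

theorem loopL_top (c : Char) (k : Nat) (t : List (Char × Nat)) (hG : GoodRuns ((c, k) :: t)) :
    loopL (expandRuns ((c, k) :: t)) c 0 [] = flatRuns ((c, k) :: t) := by
  have hexp : expandRuns ((c, k) :: t) = List.replicate k c ++ expandRuns t := by simp [expandRuns]
  rw [hexp, loopL_replicate]
  have hGt : GoodRuns t := ⟨fun r hr => hG.1 r (List.mem_cons_of_mem _ hr),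
    (List.isChain_cons.mp hG.2).2⟩
  have hnet : ∀ k' t', t = (c, k') :: t' → False := by
    intro k' t' het
    have := hG.2
    rw [het, List.isChain_cons_cons] at this
    exact this.1 rfl
  rw [loopL_main t hGt c _ _ hnet]
  simp [flatRuns]

-- ===== B-side characterisation =====

-- the run-start index of position i (what Source B's first pass computes)
def runStart (l : List Char) : Nat → Nat
  | 0 => 0
  | i + 1 => if l.getD (i + 1) ' ' = l.getD i ' ' then runStart l i else i + 1

theorem startFold (l : List Char) (n : Nat) :
    (List.range n).foldl
      (fun (st : List Nat) i =>
        st ++ [if i ≠ 0 ∧ l.getD i ' ' = l.getD (i - 1) ' ' then st.getLastD 0 else i]) []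
      = (List.range n).map (runStart l) := by
  induction n with
  | zero => rfl
  | succ m ih =>
      rw [List.range_succ, List.foldl_append, List.map_append, ih]
      cases m with
      | zero => simp [runStart]
      | succ p =>
          simp only [List.foldl_cons, List.foldl_nil, List.map_cons, List.map_nil]
          have hlast : ((List.range (p + 1)).map (runStart l)).getLastD 0 = runStart l p := by
            rw [List.range_succ, List.map_append]
            simp
          rw [hlast]
          congr 2
          show (if p + 1 ≠ 0 ∧ l.getD (p + 1) ' ' = l.getD (p + 1 - 1) ' ' then runStart l p else p + 1)
              = runStart l (p + 1)
          simp [runStart]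

theorem alt_eq_map (s : String) :
    list_total_alt s = (List.range s.toList.length).map
      (fun i : Nat => ((i : Int) - (runStart s.toList i : Int) + 1) * wgt (s.toList.getD i ' ')) := by
  unfold list_total_alt startList
  rw [startFold]
  apply List.map_congr_left
  intro i hi
  rw [List.mem_range] at hi
  have hi' : i < s.length := by simpa using hi
  have h : ((List.range s.toList.length).map (runStart s.toList)).getD i 0 = runStart s.toList i := by
    simp [List.getD, hi']
  rw [h, wgt]

theorem getD_prefix (k : Nat) (c : Char) (b : List Char) (i : Nat) (hi : i < k) :
    (List.replicate k c ++ b).getD i ' ' = c := by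
  rw [List.getD, List.getElem?_append_left (by simpa using hi)]
  simp [hi]

theorem getD_suffix (k : Nat) (c : Char) (b : List Char) (j : Nat) :
    (List.replicate k c ++ b).getD (k + j) ' ' = b.getD j ' ' := by
  rw [List.getD, List.getElem?_append_right (by simp)]
  simp [List.getD]

theorem runStart_prefix (k : Nat) (c : Char) (b : List Char) (i : Nat) (hi : i < k) :
    runStart (List.replicate k c ++ b) i = 0 := by
  induction i with
  | zero => rfl
  | succ p ih =>
      rw [runStart, getD_prefix k c b (p + 1) hi, getD_prefix k c b p (by omega), if_pos rfl]
      exact ih (by omega)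

theorem runStart_suffix (k : Nat) (c : Char) (b : List Char) (hk : 1 ≤ k)
    (hb : b = [] ∨ b.getD 0 ' ' ≠ c) (j : Nat) (hj : j < b.length) :
    runStart (List.replicate k c ++ b) (k + j) = k + runStart b j := by
  induction j with
  | zero =>
      obtain ⟨m, rfl⟩ : ∃ m, k = m + 1 := ⟨k - 1, by omega⟩
      rcases hb with hb | hb
      · subst hb; simp at hj
      · have h1 : (List.replicate (m + 1) c ++ b).getD (m + 1) ' ' = b.getD 0 ' ' := by
          have := getD_suffix (m + 1) c b 0
          simpa using this
        have h2 : (List.replicate (m + 1) c ++ b).getD m ' ' = c :=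
          getD_prefix (m + 1) c b m (by omega)
        show runStart (List.replicate (m + 1) c ++ b) (m + 1) = m + 1 + runStart b 0
        simp only [runStart, h1, h2]
        rw [if_neg hb]
  | succ p ih =>
      have h1 : (List.replicate k c ++ b).getD ((k + p) + 1) ' ' = b.getD (p + 1) ' ' := by
        have := getD_suffix k c b (p + 1)
        rw [show k + (p + 1) = (k + p) + 1 from by omega] at this
        exact this
      have h2 : (List.replicate k c ++ b).getD (k + p) ' ' = b.getD p ' ' :=
        getD_suffix k c b p
      rw [show k + (p + 1) = (k + p) + 1 from by omega]
      simp only [runStart, h1, h2]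
      by_cases he : b.getD (p + 1) ' ' = b.getD p ' '
      · rw [if_pos he, if_pos he, ih (by omega)]
      · rw [if_neg he, if_neg he]
        omega

theorem expandRuns_head_ne (c : Char) (m : Nat) (t : List (Char × Nat))
    (hG : GoodRuns ((c, m + 1) :: t)) :
    expandRuns t = [] ∨ (expandRuns t).getD 0 ' ' ≠ c := by
  cases t with
  | nil => left; rfl
  | cons r t' =>
      obtain ⟨c', k'⟩ := r
      right
      obtain ⟨q, rfl⟩ : ∃ q, k' = q + 1 := by
        have := hG.1 (c', k') (List.mem_cons_of_mem _ List.mem_cons_self)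
        exact ⟨k' - 1, by omega⟩
      have hne : c ≠ c' := by
        have := hG.2
        rw [List.isChain_cons_cons] at this
        exact this.1
      have : (expandRuns ((c', q + 1) :: t')).getD 0 ' ' = c' := by
        show (List.replicate (q + 1) c' ++ expandRuns t').getD 0 ' ' = c'
        exact getD_prefix (q + 1) c' _ 0 (by omega)
      rw [this]
      exact fun h => hne h.symm

theorem flatRuns_eq_map (rs : List (Char × Nat)) (hG : GoodRuns rs) :
    flatRuns rs = (List.range (expandRuns rs).length).map
      (fun i : Nat => ((i : Int) - (runStart (expandRuns rs) i : Int) + 1) * wgt ((expandRuns rs).getD i ' ')) := by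
  induction rs with
  | nil => rfl
  | cons r t ih =>
      obtain ⟨c, k⟩ := r
      obtain ⟨m, rfl⟩ : ∃ m, k = m + 1 := by
        have := hG.1 (c, k) List.mem_cons_self
        exact ⟨k - 1, by omega⟩
      have hGt : GoodRuns t := ⟨fun r hr => hG.1 r (List.mem_cons_of_mem _ hr),
        (List.isChain_cons.mp hG.2).2⟩
      have hb := expandRuns_head_ne c m t hG
      set b := expandRuns t with hbdef
      have hexp : expandRuns ((c, m + 1) :: t) = List.replicate (m + 1) c ++ b := by
        simp [expandRuns, hbdef]
      rw [hexp]
      have hlen : (List.replicate (m + 1) c ++ b).length = (m + 1) + b.length := by simp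
      have hfr : flatRuns ((c, m + 1) :: t)
          = (List.range (m + 1)).map (fun j : Nat => ((j : Int) + 1) * wgt c) ++ flatRuns t := by
        simp [flatRuns]
      rw [hlen, List.range_add, List.map_append, List.map_map, hfr]
      congr 1
      · apply List.map_congr_left
        intro i hi
        rw [List.mem_range] at hi
        rw [runStart_prefix (m + 1) c b i hi, getD_prefix (m + 1) c b i hi]
        push_cast
        ring
      · rw [ih hGt]
        apply List.map_congr_left
        intro j hj
        rw [List.mem_range] at hj
        simp only [Function.comp_apply]
        rw [runStart_suffix (m + 1) c b (by omega) hb j hj, getD_suffix (m + 1) c b j]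
        push_cast
        ring

-- ===== VERDICT (by name: the statement is the Claim_ definition above) =====
theorem list_total_raises : Claim_raises_list_total := by
  unfold Claim_raises_list_total
  exact ⟨fun s _ h => by simp [Raises_list_total] at h; simp [Pre_list_total, h], by decide⟩

theorem list_total_spec : Claim_equal_list_total := by
  -- (list_total_raises above covers the one input Pre_ excludes; here A = B on all of Pre_)
  have _hexcluded := list_total_raises
  intro s _ hpre
  unfold Spec_list_total
  cases hs : s.toList with
  | nil =>
      simp only [String.toList_eq_nil_iff] at hs
      exact absurd hs hpre
  | cons c rest =>
      obtain ⟨k, t, hrt⟩ := runsOf_head c rest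
      have hGood := runsOf_good (c :: rest)
      rw [hrt] at hGood
      have hexp : expandRuns ((c, k) :: t) = c :: rest := by
        rw [← hrt, runsOf_expand]
      calc list_total s = loopA s.toList 0 c 0 [] := by simp [list_total, hs]
        _ = loopL (c :: rest) c 0 [] := by rw [loopA_eq_loopL, List.drop_zero, hs]
        _ = flatRuns ((c, k) :: t) := by rw [← hexp]; exact loopL_top c k t hGood
        _ = list_total_alt s := by
            rw [alt_eq_map, hs, ← hexp, ← flatRuns_eq_map _ hGood]
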